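-- pv_equiv track=rewrite | github.com/song-xh/HTB_CodeRepository | utils/util.py | min_but_zero
-- ===== SOURCE A (Python) =====
-- def min_but_zero(state_left_time):
--     non_zero_list = []
--     for eve in state_left_time:
--         if eve != 0:
--             non_zero_list.append(eve)   # 各个站位非0工作时间列表
--     if len(non_zero_list) != 0:
--         return min(non_zero_list)   # 返回最小的工作时间
--     else:
--         return 0    # 若每个站位的工作时间都为0则返回0
-- ===== SOURCE B (Python) =====
-- def min_but_zero(state_left_time):
--     best = None
--     for eve in state_left_time:
--         if eve == 0:
--             continue
--         if best is None or eve < best: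
--             best = eve
--     return best if best is not None else 0
-- ===== Notes on version B (the rewrite author's own statement) =====
-- stated objective: simpler
-- what changed: Single fused pass keeping a running Optional best instead of building an intermediate filtered list and calling min on it.
import Mathlib
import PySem

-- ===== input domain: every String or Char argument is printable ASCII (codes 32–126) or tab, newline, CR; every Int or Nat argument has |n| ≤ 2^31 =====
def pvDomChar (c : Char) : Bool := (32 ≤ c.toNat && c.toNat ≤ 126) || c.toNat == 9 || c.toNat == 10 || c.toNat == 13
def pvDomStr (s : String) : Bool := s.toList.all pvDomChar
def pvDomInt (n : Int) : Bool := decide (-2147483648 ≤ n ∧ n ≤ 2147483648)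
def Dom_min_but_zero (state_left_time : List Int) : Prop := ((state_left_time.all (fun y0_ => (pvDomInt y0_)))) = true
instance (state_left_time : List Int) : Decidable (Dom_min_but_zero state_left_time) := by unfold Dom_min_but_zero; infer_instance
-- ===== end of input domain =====

-- ===== PORT A =====
-- B fuses A's filter-then-min into one pass with a running Optional best; same return value.
def min_but_zero (state_left_time : List Int) : Int :=
  let non_zero_list :=
    state_left_time.foldl (fun acc eve => if eve ≠ 0 then acc ++ [eve] else acc) []
  if non_zero_list.length ≠ 0 then
    match PySem.List.min? non_zero_list (fun y => y) with
    | some m => m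
    | none => 0   -- unreachable: guarded by the length test
  else 0

-- ===== PORT B =====
def minBzLoop : List Int → Option Int → Option Int
  | [], best => best
  | eve :: t, best =>
    if eve = 0 then minBzLoop t best
    else
      match best with
      | none => minBzLoop t (some eve)
      | some b => minBzLoop t (if eve < b then some eve else some b)

def min_but_zero_alt (state_left_time : List Int) : Int :=
  match minBzLoop state_left_time none with
  | some b => b
  | none => 0

-- ===== PRECONDITION & SPEC =====
def Spec_min_but_zero (state_left_time : List Int) (out : Int) : Prop := out = min_but_zero_alt state_left_time
instance (state_left_time : List Int) (out : Int) : Decidable (Spec_min_but_zero state_left_time out) := by unfold Spec_min_but_zero; infer_instance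

-- ===== CLAIM (what is proved, stated in full; the proofs are below) =====
def Claim_equal_min_but_zero : Prop := ∀ (state_left_time : List Int), Dom_min_but_zero state_left_time → Spec_min_but_zero state_left_time (min_but_zero state_left_time)

-- ===== LEMMAS AND PROOFS =====
theorem minBzLoop_filter (xs : List Int) (best : Option Int) :
    minBzLoop xs best = minBzLoop (xs.filter (fun e => !decide (e = 0))) best := by
  induction xs generalizing best with
  | nil => rfl
  | cons e t ih =>
    by_cases h : e = 0 <;> simp [minBzLoop, h, List.filter, ih]

theorem minBzLoop_some (xs : List Int) (b : Int) :
    minBzLoop xs (some b) = some ((xs.filter (fun e => !decide (e = 0))).foldl min b) := by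
  induction xs generalizing b with
  | nil => rfl
  | cons e t ih =>
    by_cases h : e = 0
    · simp [minBzLoop, h, List.filter, ih]
    · simp only [minBzLoop, List.filter, h, decide_false, Bool.not_false, List.foldl_cons]
      simp only [if_false]
      rcases lt_or_ge e b with hlt | hge
      · rw [if_pos hlt, ih, min_eq_right (le_of_lt hlt)]
      · rw [if_neg (not_lt.mpr hge), ih, min_eq_left hge]

theorem minBzLoop_cons (x : Int) (t : List Int) (h : ∀ e ∈ x :: t, e ≠ 0) :
    minBzLoop (x :: t) none = some (t.foldl min x) := by
  have hx : x ≠ 0 := h x (List.mem_cons_self ..)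
  have ht : t.filter (fun e => !decide (e = 0)) = t := by
    apply List.filter_eq_self.mpr
    intro e he; simpa using h e (List.mem_cons_of_mem _ he)
  simp [minBzLoop, hx, minBzLoop_some, ht]

-- ===== VERDICT (by name: the statement is the Claim_ definition above) =====
theorem min_but_zero_spec : Claim_equal_min_but_zero := by
  intro xs _
  unfold Spec_min_but_zero min_but_zero min_but_zero_alt
  rw [show (fun (acc : List Int) (eve : Int) => if eve ≠ 0 then acc ++ [eve] else acc)
        = (fun acc eve => if (!decide (eve = 0)) = true then acc ++ [eve] else acc) by
      funext acc eve; by_cases h : eve = 0 <;> simp [h]]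
  rw [PySem.List.foldl_append_if_eq_filter, List.nil_append, minBzLoop_filter]
  have hne : ∀ e ∈ xs.filter (fun e => !decide (e = 0)), e ≠ 0 :=
    fun e he => by simpa using (List.mem_filter.mp he).2
  cases hf : xs.filter (fun e => !decide (e = 0)) with
  | nil => simp [minBzLoop]
  | cons y ys =>
    rw [hf] at hne
    simp [minBzLoop_cons y ys hne, PySem.List.min?_id_cons]
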